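-- pv_equiv track=rewrite | github.com/ai-kmu/etc | algorithm/2023/0503_2498_Frog_Jump_II/Hyunjong.py | maxJump
-- ===== SOURCE A (Python) =====
-- def maxJump(stones):
--     """
--     :type stones: List[int]
--     :rtype: int
--     """
--
--     n = len(stones)
--     if n == 2:
--         return stones[-1]
--
--     result = 0
--     for i in range(0, n-2):
--         dist = stones[i+2] - stones[i]
--         result = max(result, dist)
--     return result
-- ===== SOURCE B (Python) =====
-- def maxJump(stones):
--     n = len(stones)
--     if n == 2:
--         return stones[-1]
--
--     def maxgap(path):
--         return max((b - a for a, b in zip(path, path[1:])), default=0)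
--
--     return max(0, maxgap(stones[::2]), maxgap(stones[1::2]))
-- ===== Notes on version B (the rewrite author's own statement) =====
-- stated objective: alternative
-- what changed: B splits the stones into the two alternating paths (even- and odd-indexed subsequences via slicing) and returns the max of each path's maximum consecutive gap, instead of A's single indexed loop over two-apart differences.
import Mathlib
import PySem

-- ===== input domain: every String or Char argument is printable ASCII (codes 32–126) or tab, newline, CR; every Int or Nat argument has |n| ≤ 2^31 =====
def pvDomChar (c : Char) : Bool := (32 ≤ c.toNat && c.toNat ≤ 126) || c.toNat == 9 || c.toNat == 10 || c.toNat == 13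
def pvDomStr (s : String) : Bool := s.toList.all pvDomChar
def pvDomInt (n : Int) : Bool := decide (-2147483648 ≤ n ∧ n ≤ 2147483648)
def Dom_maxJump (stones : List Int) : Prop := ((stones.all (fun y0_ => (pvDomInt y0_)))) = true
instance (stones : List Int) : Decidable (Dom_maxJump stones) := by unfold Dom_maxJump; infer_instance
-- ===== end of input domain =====

-- B is an alternative same-cost decomposition: it slices the stones into the two alternating paths
-- and returns the max of each path's maximum consecutive gap, instead of A's single indexed loop
-- over two-apart differences.

-- ===== PORT A =====
-- stones[-1] is in range under the n == 2 guard, so the default of pyGetD is never used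
def maxJump (stones : List Int) : Int :=
  if PySem.List.len stones = 2 then PySem.List.pyGetD stones (-1) 0
  else
    (PySem.List.pyRange 0 (PySem.List.len stones - 2) 1).foldl
      (fun result i =>
        max result (PySem.List.pyGetD stones (i + 2) 0 - PySem.List.pyGetD stones i 0)) 0

-- ===== PORT B =====
-- max((b - a for a, b in zip(path, path[1:])), default=0)
def pvMaxgap (path : List Int) : Int :=
  PySem.List.maxD ((path.zip (PySem.List.slice path (some 1) none)).map (fun p => p.2 - p.1))
    (fun x => x) 0

-- stones[::2] / stones[1::2] have step 2 ≠ 0, so slice? is never none and getD's [] is never used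
def maxJump_alt (stones : List Int) : Int :=
  if PySem.List.len stones = 2 then PySem.List.pyGetD stones (-1) 0
  else
    max (max 0 (pvMaxgap ((PySem.List.slice? stones none none 2).getD [])))
      (pvMaxgap ((PySem.List.slice? stones (some 1) none 2).getD []))

-- ===== PRECONDITION & SPEC =====
def Spec_maxJump (stones : List Int) (out : Int) : Prop := out = maxJump_alt stones
instance (stones : List Int) (out : Int) : Decidable (Spec_maxJump stones out) := by unfold Spec_maxJump; infer_instance

-- ===== CLAIM (what is proved, stated in full; the proofs are below) =====
def Claim_equal_maxJump : Prop := ∀ (stones : List Int), Dom_maxJump stones → Spec_maxJump stones (maxJump stones)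

-- ===== LEMMAS AND PROOFS =====

-- the even-indexed subsequence xs[::2]
def pvEvens : List Int → List Int
  | [] => []
  | [a] => [a]
  | a :: _ :: t => a :: pvEvens t

-- consecutive gaps of a path
def pvGaps1 : List Int → List Int
  | a :: b :: t => (b - a) :: pvGaps1 (b :: t)
  | _ => []

-- two-apart gaps, as A computes them
def pvGaps2 : List Int → List Int
  | a :: b :: c :: t => (c - a) :: pvGaps2 (b :: c :: t)
  | _ => []

theorem pvEvens_cons (c : Int) (t : List Int) : pvEvens (c :: t) = c :: pvEvens t.tail := by
  cases t <;> rfl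

theorem pvZipMap_eq_gaps1 (p : List Int) :
    (p.zip p.tail).map (fun q : Int × Int => q.2 - q.1) = pvGaps1 p := by
  induction p using pvGaps1.induct with
  | case1 a b t ih => simpa [pvGaps1] using ih
  | case2 p h =>
    match p, h with
    | [], _ => rfl
    | [a], _ => rfl
    | a :: b :: t, h => exact absurd rfl (h a b t)

theorem pvFiltEvens (xs : List Int) :
    List.filterMap (fun k => xs[2 * k]?) (List.range ((xs.length + 1) / 2)) = pvEvens xs := by
  induction xs using pvEvens.induct with
  | case1 => rfl
  | case2 a => simp [List.range_succ, pvEvens]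
  | case3 a b t ih =>
    have hlen : ((a :: b :: t).length + 1) / 2 = (t.length + 1) / 2 + 1 := by
      simp; omega
    rw [hlen, List.range_succ_eq_map, List.filterMap_cons, List.filterMap_map]
    have he : (fun k => (a :: b :: t)[2 * k]?) ∘ Nat.succ = fun k => t[2 * k]? := by
      funext k
      have h2 : 2 * Nat.succ k = 2 * k + 1 + 1 := by omega
      simp [h2]
    rw [he, show pvEvens (a :: b :: t) = a :: pvEvens t from rfl, ← ih]
    rfl

theorem pvSliceEvens (xs : List Int) :
    PySem.List.slice? xs none none 2 = some (pvEvens xs) := by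
  simp only [PySem.List.slice?, PySem.List.sliceIndices]
  norm_num
  rw [show (if 0 < xs.length then (((xs.length : Int) + 2 - 1) / 2).toNat else 0)
      = (xs.length + 1) / 2 by split_ifs <;> omega]
  rw [← pvFiltEvens xs]
  apply List.filterMap_congr
  intro k _
  congr 1

theorem pvSliceOdds (xs : List Int) :
    PySem.List.slice? xs (some 1) none 2 = some (pvEvens xs.tail) := by
  simp only [PySem.List.slice?, PySem.List.sliceIndices]
  norm_num
  rw [show (if 1 < xs.length then (((xs.length : Int) - min 1 (xs.length : Int) + 2 - 1) / 2).toNat else 0)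
      = (xs.tail.length + 1) / 2 by simp [List.length_tail]; split_ifs <;> omega]
  rw [← pvFiltEvens xs.tail]
  apply List.filterMap_congr
  intro k hk
  have hkm : k < (xs.tail.length + 1) / 2 := List.mem_range.mp hk
  have h1 : 1 ≤ xs.length := by simp [List.length_tail] at hkm; omega
  rw [List.getElem?_tail]
  congr 1
  omega

theorem pvRangeMap_eq_gaps2 (xs : List Int) :
    (List.range (xs.length - 2)).map (fun k => xs.getD (k + 2) 0 - xs.getD k 0) = pvGaps2 xs := by
  induction xs using pvGaps2.induct with
  | case1 a b c t ih =>
    have hlen : (a :: b :: c :: t).length - 2 = t.length + 1 := by simp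
    rw [hlen, List.range_succ_eq_map, List.map_cons, List.map_map]
    have he : (fun k => (a :: b :: c :: t).getD (k + 2) 0 - (a :: b :: c :: t).getD k 0) ∘ Nat.succ
        = fun k => (b :: c :: t).getD (k + 2) 0 - (b :: c :: t).getD k 0 := by
      funext k; rfl
    rw [he, show t.length = (b :: c :: t).length - 2 by simp, ih]
    rfl
  | case2 p h =>
    match p, h with
    | [], _ => rfl
    | [a], _ => rfl
    | [a, b], _ => rfl
    | a :: b :: c :: t, h => exact absurd rfl (h a b c t)

theorem pvGaps2_perm (xs : List Int) :
    (pvGaps2 xs).Perm (pvGaps1 (pvEvens xs) ++ pvGaps1 (pvEvens xs.tail)) := by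
  induction xs using pvGaps2.induct with
  | case1 a b c t ih =>
    have he2 : pvEvens (c :: t) = c :: pvEvens t.tail := pvEvens_cons c t
    rw [show pvEvens (a :: b :: c :: t) = a :: pvEvens (c :: t) from rfl, he2,
        show (a :: b :: c :: t).tail = b :: c :: t from rfl]
    rw [show pvGaps1 (a :: c :: pvEvens t.tail) = (c - a) :: pvGaps1 (c :: pvEvens t.tail) from rfl]
    rw [show pvGaps2 (a :: b :: c :: t) = (c - a) :: pvGaps2 (b :: c :: t) from rfl]
    rw [← he2, List.cons_append]
    refine List.Perm.cons _ (ih.trans ?_)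
    rw [show (b :: c :: t).tail = c :: t from rfl]
    exact List.perm_append_comm
  | case2 p h =>
    match p, h with
    | [], _ => simp [pvGaps2, pvEvens, pvGaps1]
    | [a], _ => simp [pvGaps2, pvEvens, pvGaps1]
    | [a, b], _ => simp [pvGaps2, pvEvens, pvGaps1]
    | a :: b :: c :: t, h => exact absurd rfl (h a b c t)

theorem pvClamp_maxD (l : List Int) : max 0 (PySem.List.maxD l (fun x => x) 0) = l.foldl max 0 := by
  cases l with
  | nil => rfl
  | cons x t =>
    rw [show PySem.List.maxD (x :: t) (fun x => x) 0
        = ((PySem.List.max? (x :: t) (fun y => y)).getD 0) from rfl]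
    rw [PySem.List.max?_id_cons]
    show max 0 (t.foldl max x) = t.foldl max (max 0 x)
    exact (List.foldl_assoc (op := max)).symm

theorem pvAbsorb_maxD (X : Int) (hX : 0 ≤ X) (l : List Int) :
    max X (PySem.List.maxD l (fun x => x) 0) = l.foldl max X := by
  cases l with
  | nil => simpa using hX
  | cons x t =>
    rw [show PySem.List.maxD (x :: t) (fun x => x) 0
        = ((PySem.List.max? (x :: t) (fun y => y)).getD 0) from rfl]
    rw [PySem.List.max?_id_cons]
    show max X (t.foldl max x) = t.foldl max (max X x)
    exact (List.foldl_assoc (op := max)).symm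

-- ===== VERDICT (by name: the statement is the Claim_ definition above) =====
theorem maxJump_spec : Claim_equal_maxJump := by
  intro stones _
  show maxJump stones = maxJump_alt stones
  unfold maxJump maxJump_alt
  by_cases h2 : PySem.List.len stones = 2
  · rw [if_pos h2, if_pos h2]
  · rw [if_neg h2, if_neg h2]
    -- A side: loop = foldl max 0 (pvGaps2 stones)
    have hA : (PySem.List.pyRange 0 (PySem.List.len stones - 2) 1).foldl
        (fun result i =>
          max result (PySem.List.pyGetD stones (i + 2) 0 - PySem.List.pyGetD stones i 0)) 0
        = (pvGaps2 stones).foldl max 0 := by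
      rw [PySem.List.pyRange_one, List.foldl_map]
      rw [show ((PySem.List.len stones - 2 - 0).toNat) = stones.length - 2 by
        simp [PySem.List.len_eq]; omega]
      rw [← pvRangeMap_eq_gaps2 stones, List.foldl_map]
      apply PySem.List.foldl_congr_mem
      intro acc k hk
      rw [show (0 : Int) + (k : Int) + 2 = ((k + 2 : Nat) : Int) by push_cast; ring,
        show (0 : Int) + (k : Int) = ((k : Nat) : Int) by ring,
        PySem.List.pyGetD_natCast, PySem.List.pyGetD_natCast]
    rw [hA, pvSliceEvens, pvSliceOdds]
    simp only [Option.getD_some]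
    unfold pvMaxgap
    rw [PySem.List.slice_from_one, PySem.List.slice_from_one,
        pvZipMap_eq_gaps1, pvZipMap_eq_gaps1]
    rw [pvClamp_maxD]
    have h0 : (0 : Int) ≤ (pvGaps1 (pvEvens stones)).foldl max 0 :=
      (PySem.List.le_foldl_max _ 0).1
    rw [pvAbsorb_maxD _ h0]
    rw [← List.foldl_append]
    haveI : RightCommutative (max : Int → Int → Int) :=
      ⟨fun b a₁ a₂ => by rw [max_assoc, max_comm a₁ a₂, ← max_assoc]⟩
    exact (pvGaps2_perm stones).foldl_eq 0
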